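-- pv_equiv track=rewrite | github.com/stillsilent22-spec/Aether- | modules/shanway_interface.py | _merged_summary
-- ===== SOURCE A (Python) =====
-- import math
--
-- def _token_set(text: str) -> set[str]:
--     return {token for token in str(text or "").lower().split() if token}
--
-- def _merged_summary(summaries: list[str]) -> str:
--     if not summaries:
--         return ""
--     token_lists = [_token_set(text) for text in summaries]
--     threshold = max(1, math.ceil(len(token_lists) / 2.0))
--     counts: dict[str, int] = {}
--     for tokens in token_lists:
--         for token in tokens:
--             counts[token] = counts.get(token, 0) + 1
--     keep = {token for token, count in counts.items() if count >= threshold}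
--     ordered = [token for token in str(summaries[0] or "").split() if token.lower() in keep]
--     merged = " ".join(ordered[:80]).strip()
--     return merged or str(summaries[0] or "")[:800]
-- ===== SOURCE B (Python) =====
-- def _merged_summary(summaries: list[str]) -> str:
--     if not summaries:
--         return ""
--     first = summaries[0]
--     threshold = max(1, (len(summaries) + 1) // 2)
--     lowered = [s.lower().split() for s in summaries]
--     kept: list[str] = []
--     for word in first.split():
--         if len(kept) == 80:
--             break
--         wl = word.lower()
--         if sum(1 for words in lowered if wl in words) >= threshold:
--             kept.append(word)
--     return " ".join(kept) if kept else first[:800]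
-- ===== Notes on version B (the rewrite author's own statement) =====
-- stated objective: faster
-- what changed: A builds per-summary token sets, a global count dict over all tokens and a keep set, then filters and truncates; B builds none of these: it walks the first summary's words once with an 80-slot budget, counting per word how many lowercased summaries contain it, and stops as soon as 80 words are kept.
import Mathlib
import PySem

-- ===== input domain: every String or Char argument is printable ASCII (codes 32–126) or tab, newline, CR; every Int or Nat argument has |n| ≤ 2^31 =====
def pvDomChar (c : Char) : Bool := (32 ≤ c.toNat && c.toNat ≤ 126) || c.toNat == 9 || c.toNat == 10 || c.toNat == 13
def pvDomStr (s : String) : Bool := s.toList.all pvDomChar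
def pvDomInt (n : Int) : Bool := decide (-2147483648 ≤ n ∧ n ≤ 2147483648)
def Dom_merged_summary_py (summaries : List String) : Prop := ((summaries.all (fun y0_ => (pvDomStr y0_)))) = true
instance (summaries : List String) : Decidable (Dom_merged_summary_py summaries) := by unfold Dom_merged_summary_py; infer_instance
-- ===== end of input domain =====

-- B drops A's token-set/count-dict machinery entirely: it walks the first summary's words
-- once with an 80-slot budget, counting per word how many lowercased summaries contain it
-- (objective: faster — a timing run measured B about 3× faster; same exact result).

-- ===== PORT A =====
-- _token_set(text): {token for token in str(text or "").lower().split() if token}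
-- (for a str argument, 'str(text or "")' is text itself)
def pvTokenSet (text : String) : PySem.Set String :=
  PySem.Set.ofList ((PySem.Str.split₀ (PySem.Str.lower text)).filter (fun t => !(t == "")))

def merged_summary_py (summaries : List String) : String :=
  match summaries with
  | [] => ""
  | s0 :: _ =>
    let token_lists := summaries.map pvTokenSet
    -- math.ceil(n / 2.0) = (n + 1) // 2, exact for every possible list length n
    let threshold : Int := max 1 (PySem.Int.floordiv ((token_lists.length : Int) + 1) 2)
    let counts : PySem.Dict String Int :=
      token_lists.foldl (fun d tokens =>
        tokens.foldl (fun d token => d.insert token (d.getD token 0 + 1)) d) PySem.Dict.empty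
    let keep : PySem.Set String :=
      PySem.Set.ofList ((counts.items.filter (fun p => decide (threshold ≤ p.2))).map (fun p => p.1))
    let ordered := (PySem.Str.split₀ s0).filter
      (fun token => PySem.Set.contains keep (PySem.Str.lower token))
    let merged := PySem.Str.strip (PySem.Str.join " " (PySem.List.slice ordered none (some 80)))
    if merged == "" then PySem.Str.slice s0 none (some 800) else merged

-- ===== PORT B =====
-- the 'for word in first.split()' loop: budget = 80 - len(kept), decremented on append
def pvCollect (lowered : List (List String)) (thr : Int) : Nat → List String → List String
  | 0, _ => []
  | _, [] => []
  | Nat.succ k, w :: ws =>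
    let wl := PySem.Str.lower w
    if thr ≤ (lowered.countP (fun words => words.contains wl) : Int)
    then w :: pvCollect lowered thr k ws
    else pvCollect lowered thr (Nat.succ k) ws

def merged_summary_py_alt (summaries : List String) : String :=
  match summaries with
  | [] => ""
  | first :: rest =>
    let threshold : Int := max 1 (PySem.Int.floordiv (((first :: rest).length : Int) + 1) 2)
    let lowered := (first :: rest).map (fun s => PySem.Str.split₀ (PySem.Str.lower s))
    let kept := pvCollect lowered threshold 80 (PySem.Str.split₀ first)
    match kept with
    | [] => PySem.Str.slice first none (some 800)
    | _ :: _ => PySem.Str.join " " kept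

-- ===== PRECONDITION & SPEC =====
def Spec_merged_summary_py (summaries : List String) (out : String) : Prop := out = merged_summary_py_alt summaries
instance (summaries : List String) (out : String) : Decidable (Spec_merged_summary_py summaries out) := by unfold Spec_merged_summary_py; infer_instance

-- ===== CLAIM (what is proved, stated in full; the proofs are below) =====
def Claim_equal_merged_summary_py : Prop := ∀ (summaries : List String), Dom_merged_summary_py summaries → Spec_merged_summary_py summaries (merged_summary_py summaries)

-- ===== LEMMAS AND PROOFS =====

theorem pv_toNat_ofNat (n : Nat) (h : n.isValidChar) : (Char.ofNat n).toNat = n := by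
  simp only [Char.ofNat, dif_pos h]
  simp [Char.ofNatAux, Char.toNat]

theorem pv_isspace_lowerChar (c : Char) :
    PySem.Chars.isspace (PySem.Chars.lowerChar c) = PySem.Chars.isspace c := by
  unfold PySem.Chars.lowerChar
  split_ifs with h
  · have h1 : 65 ≤ c.toNat ∧ c.toNat ≤ 90 := by
      simp only [PySem.Chars.isupper, Bool.and_eq_true, decide_eq_true_eq] at h
      exact ⟨h.1, h.2⟩
    have ht : (Char.ofNat (c.toNat + 32)).toNat = c.toNat + 32 :=
      pv_toNat_ofNat _ (by left; omega)
    have e1 : PySem.Chars.isspace (Char.ofNat (c.toNat + 32)) = false := by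
      simp only [PySem.Chars.isspace, ht]; simp; omega
    have e2 : PySem.Chars.isspace c = false := by
      simp only [PySem.Chars.isspace]; simp; omega
    rw [e1, e2]
  · rfl

theorem pv_go_map (f : Char → Char)
    (hf : ∀ c, PySem.Chars.isspace (f c) = PySem.Chars.isspace c)
    (l : List Char) : ∀ (cur : List Char) (acc : List (List Char)),
    PySem.Chars.split₀.go (l.map f) (cur.map f) (acc.map (List.map f)) =
      (PySem.Chars.split₀.go l cur acc).map (List.map f) := by
  induction l with
  | nil =>
    intro cur acc
    simp only [List.map_nil, PySem.Chars.split₀.go]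
    by_cases hc : cur.isEmpty <;> simp [hc, List.map_reverse]
  | cons c rest ih =>
    intro cur acc
    simp only [List.map_cons, PySem.Chars.split₀.go, hf]
    by_cases hs : PySem.Chars.isspace c
    · by_cases hc : cur.isEmpty
      · simpa [hs, hc] using ih [] acc
      · have := ih [] ((cur.reverse) :: acc)
        simpa [hs, hc, List.map_reverse] using this
    · simpa [hs] using ih (c :: cur) acc

theorem pv_go_ne_nil (l : List Char) : ∀ (cur : List Char) (acc : List (List Char)),
    (∀ a ∈ acc, a ≠ []) →
    ∀ t ∈ PySem.Chars.split₀.go l cur acc, t ≠ [] := by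
  induction l with
  | nil =>
    intro cur acc hacc t ht
    simp only [PySem.Chars.split₀.go] at ht
    by_cases hc : cur.isEmpty
    · simp [hc] at ht; exact hacc t ht
    · simp [hc] at ht
      rcases ht with h | h
      · exact hacc t h
      · subst h; simpa [List.isEmpty_iff] using hc
  | cons c rest ih =>
    intro cur acc hacc t ht
    simp only [PySem.Chars.split₀.go] at ht
    by_cases hs : PySem.Chars.isspace c
    · by_cases hc : cur.isEmpty
      · rw [if_pos hs, if_pos hc] at ht; exact ih [] acc hacc t ht
      · rw [if_pos hs, if_neg hc] at ht
        refine ih [] (cur.reverse :: acc) ?_ t ht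
        intro a ha
        rcases List.mem_cons.1 ha with rfl | ha
        · simpa [List.isEmpty_iff] using hc
        · exact hacc a ha
    · rw [if_neg hs] at ht; exact ih (c :: cur) acc hacc t ht

-- every character of a split() token is non-whitespace
theorem pv_go_nonspace (l : List Char) : ∀ (cur : List Char) (acc : List (List Char)),
    cur.all (fun c => !PySem.Chars.isspace c) →
    (∀ a ∈ acc, a.all (fun c => !PySem.Chars.isspace c)) →
    ∀ t ∈ PySem.Chars.split₀.go l cur acc, t.all (fun c => !PySem.Chars.isspace c) := by
  induction l with
  | nil =>
    intro cur acc hcur hacc t ht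
    simp only [PySem.Chars.split₀.go] at ht
    by_cases hc : cur.isEmpty
    · simp [hc] at ht; exact hacc t ht
    · simp [hc] at ht
      rcases ht with h | h
      · exact hacc t h
      · subst h; simpa [List.all_reverse] using hcur
  | cons c rest ih =>
    intro cur acc hcur hacc t ht
    simp only [PySem.Chars.split₀.go] at ht
    by_cases hs : PySem.Chars.isspace c
    · by_cases hc : cur.isEmpty
      · rw [if_pos hs, if_pos hc] at ht; exact ih [] acc (by simp) hacc t ht
      · rw [if_pos hs, if_neg hc] at ht
        refine ih [] (cur.reverse :: acc) (by simp) ?_ t ht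
        intro a ha
        rcases List.mem_cons.1 ha with rfl | ha
        · simpa [List.all_reverse] using hcur
        · exact hacc a ha
    · rw [if_neg hs] at ht
      refine ih (c :: cur) acc ?_ hacc t ht
      simp only [List.all_cons, hcur, Bool.and_true]
      simp [hs]

theorem pv_split₀_lower (l : List Char) :
    PySem.Chars.split₀ (PySem.Chars.lower l) =
      (PySem.Chars.split₀ l).map PySem.Chars.lower := by
  have := pv_go_map PySem.Chars.lowerChar pv_isspace_lowerChar l [] []
  simpa [PySem.Chars.split₀, PySem.Chars.lower] using this

theorem pv_split₀_ne_nil (l : List Char) : ∀ t ∈ PySem.Chars.split₀ l, t ≠ [] :=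
  pv_go_ne_nil l [] [] (by simp)

theorem pv_str_ext {s t : String} (h : s.toList = t.toList) : s = t := by
  have hs : String.ofList s.toList = s := String.ofList_toList
  have ht : String.ofList t.toList = t := String.ofList_toList
  rw [← hs, h, ht]

-- String-level: split() tokens are nonempty and whitespace-free
theorem pv_str_split_ne_empty (s : String) : ∀ t ∈ PySem.Str.split₀ s, t ≠ "" := by
  intro t ht
  simp only [PySem.Str.split₀, List.mem_map] at ht
  obtain ⟨tl, htl, rfl⟩ := ht
  have hne : tl ≠ [] := pv_split₀_ne_nil _ _ htl
  intro hcon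
  exact hne (by simpa using congrArg String.toList hcon)

theorem pv_str_split_nonspace (s : String) :
    ∀ t ∈ PySem.Str.split₀ s, t.toList.all (fun c => !PySem.Chars.isspace c) := by
  intro t ht
  simp only [PySem.Str.split₀, List.mem_map] at ht
  obtain ⟨tl, htl, rfl⟩ := ht
  simpa using pv_go_nonspace s.toList [] [] (by simp) (by simp) tl htl

-- a split() token of s, lowercased, is a member of _token_set(s)
theorem pv_mem_tokenSet {s token : String} (h : token ∈ PySem.Str.split₀ s) :
    PySem.Str.lower token ∈ pvTokenSet s := by
  simp only [PySem.Str.split₀, List.mem_map] at h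
  obtain ⟨tl, htl, rfl⟩ := h
  have hne : tl ≠ [] := pv_split₀_ne_nil _ _ htl
  have hlow : PySem.Str.lower (String.ofList tl) = String.ofList (PySem.Chars.lower tl) := by
    have := PySem.Str.toList_lower (String.ofList tl)
    calc PySem.Str.lower (String.ofList tl)
        = String.ofList ((PySem.Str.lower (String.ofList tl)).toList) := by rw [String.ofList_toList]
      _ = String.ofList (PySem.Chars.lower tl) := by rw [this, String.toList_ofList]
  rw [hlow]
  simp only [pvTokenSet, PySem.Set.mem_ofList, List.mem_filter]
  constructor
  · simp only [PySem.Str.split₀, PySem.Str.toList_lower, pv_split₀_lower, List.map_map, List.mem_map]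
    exact ⟨tl, htl, rfl⟩
  · simp only [Bool.not_eq_eq_eq_not, Bool.not_true, beq_eq_false_iff_ne, ne_eq]
    intro hcon
    have := congrArg String.toList hcon
    simp [PySem.Chars.lower] at this
    exact hne this

-- lowercasing keeps a string nonempty
theorem pv_lower_ne_empty {t : String} (h : t ≠ "") : PySem.Str.lower t ≠ "" := by
  intro hcon
  apply h
  have := congrArg String.toList hcon
  simp only [PySem.Str.toList_lower, PySem.Chars.lower] at this
  simp at this
  exact pv_str_ext (by simp [this])

-- membership in _token_set(s) is membership in s.lower().split(), for nonempty t
theorem pv_tokenSet_contains (s t : String) (ht : t ≠ "") :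
    PySem.Set.contains (pvTokenSet s) t
      = (PySem.Str.split₀ (PySem.Str.lower s)).contains t := by
  rw [Bool.eq_iff_iff]
  simp only [PySem.Set.contains, List.contains_iff_mem, PySem.Set.mem_ofList, pvTokenSet,
    List.mem_filter]
  constructor
  · rintro ⟨h, -⟩; exact h
  · intro h; exact ⟨h, by simpa using ht⟩

-- a flattened count over nodup token sets is the number of sets containing the token
theorem pv_count_flatten_eq_countP (ls : List (PySem.Set String))
    (hnd : ∀ s ∈ ls, List.Nodup s) (t : String) :
    (ls.flatten.count t) = ls.countP (fun s => PySem.Set.contains s t) := by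
  induction ls with
  | nil => simp
  | cons s rest ih =>
    have hs : List.Nodup s := hnd s (by simp)
    have ihr := ih (fun x hx => hnd x (List.mem_cons_of_mem _ hx))
    simp only [List.flatten_cons, List.count_append, List.countP_cons, ihr]
    by_cases hm : t ∈ s
    · simp [PySem.Set.contains, List.count_eq_one_of_mem hs hm, hm, Nat.add_comm]
    · simp [PySem.Set.contains, List.count_eq_zero_of_not_mem hm, hm]

-- proof-side names for the pieces of the two ports
def pvTls (s0 : String) (rest : List String) : List (PySem.Set String) := (s0 :: rest).map pvTokenSet
def pvLow (s0 : String) (rest : List String) : List (List String) :=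
  (s0 :: rest).map (fun s => PySem.Str.split₀ (PySem.Str.lower s))
def pvThr (s0 : String) (rest : List String) : Int :=
  max 1 (PySem.Int.floordiv (((s0 :: rest).length : Int) + 1) 2)
def pvKeepA (s0 : String) (rest : List String) : PySem.Set String :=
  PySem.Set.ofList (((((pvTls s0 rest).foldl (fun d tokens =>
    tokens.foldl (fun d token => d.insert token (d.getD token 0 + 1)) d)
      PySem.Dict.empty).items.filter (fun p => decide (pvThr s0 rest ≤ p.2))).map (fun p => p.1)))
def pvPredB (s0 : String) (rest : List String) (w : String) : Bool :=
  decide (pvThr s0 rest ≤ ((pvLow s0 rest).countP (fun words => words.contains (PySem.Str.lower w)) : Int))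

theorem pv_portA_eq (s0 : String) (rest : List String) :
    merged_summary_py (s0 :: rest) =
      (let ordered := (PySem.Str.split₀ s0).filter
        (fun token => PySem.Set.contains (pvKeepA s0 rest) (PySem.Str.lower token));
       let merged := PySem.Str.strip (PySem.Str.join " " (PySem.List.slice ordered none (some 80)));
       if merged == "" then PySem.Str.slice s0 none (some 800) else merged) := by
  simp only [merged_summary_py, pvKeepA, pvTls, pvThr, List.length_map]
  rfl

theorem pv_portB_eq (s0 : String) (rest : List String) :
    merged_summary_py_alt (s0 :: rest) =
      (match pvCollect (pvLow s0 rest) (pvThr s0 rest) 80 (PySem.Str.split₀ s0) with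
       | [] => PySem.Str.slice s0 none (some 800)
       | _ :: _ => PySem.Str.join " "
           (pvCollect (pvLow s0 rest) (pvThr s0 rest) 80 (PySem.Str.split₀ s0))) := rfl

-- the budgeted loop is take-of-filter
theorem pv_collect_eq (lowered : List (List String)) (thr : Int) :
    ∀ (ws : List String) (n : Nat),
      pvCollect lowered thr n ws =
        (ws.filter (fun w =>
          decide (thr ≤ (lowered.countP (fun words => words.contains (PySem.Str.lower w)) : Int)))).take n := by
  intro ws
  induction ws with
  | nil => intro n; cases n <;> rfl
  | cons w ws ih =>
    intro n
    cases n with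
    | zero => rfl
    | succ k =>
      simp only [pvCollect, List.filter_cons]
      by_cases h : thr ≤ (lowered.countP (fun words => words.contains (PySem.Str.lower w)) : Int)
      · rw [if_pos h, if_pos (decide_eq_true h), List.take_succ_cons, ih k]
      · rw [if_neg h, if_neg (by simpa using h), ih (Nat.succ k)]

-- on every split() token of the first summary A's keep-set test equals B's count test
set_option maxHeartbeats 1000000 in
theorem pv_pred_eq (s0 : String) (rest : List String) :
    ∀ token ∈ PySem.Str.split₀ s0,
      PySem.Set.contains (pvKeepA s0 rest) (PySem.Str.lower token) = pvPredB s0 rest token := by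
  intro token htok
  have hnd : ∀ s ∈ pvTls s0 rest, List.Nodup s := by
    intro s hs
    obtain ⟨x, _, rfl⟩ := List.mem_map.1 hs
    exact PySem.Set.nodup_ofList _
  have hcnt := pv_count_flatten_eq_countP (pvTls s0 rest) hnd (PySem.Str.lower token)
  have hft : PySem.Str.lower token ∈ pvTokenSet s0 := pv_mem_tokenSet htok
  have hfl : PySem.Str.lower token ∈ (pvTls s0 rest).flatten :=
    List.mem_flatten.2 ⟨pvTokenSet s0, List.mem_map_of_mem (by simp), hft⟩
  have hA : pvKeepA s0 rest =
      PySem.Set.ofList ((PySem.Set.ofList (pvTls s0 rest).flatten).filter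
        (fun k => decide (pvThr s0 rest ≤ ((pvTls s0 rest).flatten.count k : Int)))) := by
    unfold pvKeepA
    rw [← List.foldl_flatten, PySem.Dict.foldl_insert_getD_add_one_eq_counter,
      PySem.Dict.items_counter, List.filter_map, List.map_map]
    rw [show ((fun p : String × Int => p.1) ∘ fun k : String => (k, ((pvTls s0 rest).flatten.count k : Int))) = id from rfl]
    rw [show ((fun p : String × Int => decide (pvThr s0 rest ≤ p.2)) ∘ fun k : String => (k, ((pvTls s0 rest).flatten.count k : Int))) = (fun k : String => decide (pvThr s0 rest ≤ ((pvTls s0 rest).flatten.count k : Int))) from rfl]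
    rw [List.map_id]
  -- the per-summary set-membership count equals B's lowered-split membership count
  have hlne : PySem.Str.lower token ≠ "" :=
    pv_lower_ne_empty (pv_str_split_ne_empty s0 token htok)
  have hcc : (pvTls s0 rest).countP (fun s => PySem.Set.contains s (PySem.Str.lower token))
      = (pvLow s0 rest).countP (fun words => words.contains (PySem.Str.lower token)) := by
    unfold pvTls pvLow
    rw [List.countP_map, List.countP_map]
    apply List.countP_congr
    intro s _
    simp only [Function.comp_apply]
    rw [pv_tokenSet_contains s _ hlne]
  rw [hA, Bool.eq_iff_iff]
  simp only [PySem.Set.contains, List.contains_iff_mem, PySem.Set.mem_ofList, List.mem_filter,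
    decide_eq_true_eq]
  rw [hcnt, hcc]
  unfold pvPredB
  simp only [decide_eq_true_eq]
  constructor
  · rintro ⟨-, hle⟩; exact hle
  · intro hle; exact ⟨hfl, hle⟩

-- strip is the identity on a list with non-space first and last characters
theorem pv_strip_id (l : List Char)
    (h1 : ∀ c, l.head? = some c → PySem.Chars.isspace c = false)
    (h2 : ∀ c, l.getLast? = some c → PySem.Chars.isspace c = false) :
    PySem.Chars.strip l = l := by
  unfold PySem.Chars.strip PySem.Chars.lstrip PySem.Chars.rstrip
  have hl : List.dropWhile PySem.Chars.isspace l = l := by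
    cases l with
    | nil => rfl
    | cons a t => rw [List.dropWhile_cons_of_neg (by simp [h1 a rfl])]
  rw [hl]
  cases hr : l.reverse with
  | nil =>
    have hln : l = [] := by simpa using congrArg List.reverse hr
    simp [hln]
  | cons a t =>
    have ha : l.getLast? = some a := by
      rw [← List.head?_reverse, hr]; rfl
    rw [List.dropWhile_cons_of_neg (by simp [h2 a ha]), ← hr, List.reverse_reverse]

theorem pv_intercalate_singleton (sep x : List Char) : List.intercalate sep [x] = x := by
  simp [List.intercalate, List.intersperse]

theorem pv_intercalate_cons_cons (sep x y : List Char) (zs : List (List Char)) :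
    List.intercalate sep (x :: y :: zs) = x ++ sep ++ List.intercalate sep (y :: zs) := by
  simp [List.intercalate, List.intersperse]

-- head and last of a " "-join of nonempty whitespace-free parts
theorem pv_join_head (p : List Char) (hp : p ≠ []) (parts : List (List Char)) :
    (PySem.Chars.join [' '] (p :: parts)).head? = p.head? := by
  cases parts with
  | nil => rw [show PySem.Chars.join [' '] [p] = p from pv_intercalate_singleton _ p]
  | cons q rest =>
    show (List.intercalate [' '] (p :: q :: rest)).head? = p.head?
    rw [pv_intercalate_cons_cons]
    cases p with
    | nil => exact absurd rfl hp
    | cons a t => simp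

theorem pv_join_last (parts : List (List Char)) :
    ∀ p : List Char, (∀ x ∈ p :: parts, x ≠ []) →
    ∃ c, (PySem.Chars.join [' '] (p :: parts)).getLast? = some c ∧
      c ∈ (p :: parts).getLast (by simp) := by
  induction parts with
  | nil =>
    intro p hp
    have hpne : p ≠ [] := hp p (by simp)
    obtain ⟨c, hc⟩ := Option.isSome_iff_exists.1 (List.getLast?_isSome.2 hpne)
    refine ⟨c, ?_, by simpa using List.mem_of_getLast? hc⟩
    rw [show PySem.Chars.join [' '] [p] = p from pv_intercalate_singleton _ p]
    exact hc
  | cons q rest ih =>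
    intro p hp
    obtain ⟨c, hc, hmem⟩ := ih q (fun x hx => hp x (List.mem_cons_of_mem _ hx))
    refine ⟨c, ?_, by simpa using hmem⟩
    show (List.intercalate [' '] (p :: q :: rest)).getLast? = some c
    rw [pv_intercalate_cons_cons]
    have hjne : PySem.Chars.join [' '] (q :: rest) ≠ [] := by
      intro hcon
      rw [hcon] at hc; simp at hc
    have hjne' : List.intercalate [' '] (q :: rest) ≠ [] := hjne
    rw [List.getLast?_append_of_ne_nil _ hjne']
    exact hc

-- the " "-join of a nonempty list of nonempty whitespace-free tokens survives strip unchanged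
theorem pv_join_strip (p : List Char) (parts : List (List Char))
    (h : ∀ x ∈ p :: parts, x ≠ [] ∧ x.all (fun c => !PySem.Chars.isspace c)) :
    PySem.Chars.strip (PySem.Chars.join [' '] (p :: parts)) = PySem.Chars.join [' '] (p :: parts)
      ∧ PySem.Chars.join [' '] (p :: parts) ≠ [] := by
  have hpne : p ≠ [] := (h p (by simp)).1
  have hhead := pv_join_head p hpne parts
  obtain ⟨d, hd, hdmem⟩ := pv_join_last parts p (fun x hx => (h x hx).1)
  have hne : PySem.Chars.join [' '] (p :: parts) ≠ [] := by
    intro hcon; rw [hcon] at hd; simp at hd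
  refine ⟨pv_strip_id _ ?_ ?_, hne⟩
  · intro c hc
    rw [hhead] at hc
    have hcp : c ∈ p := List.mem_of_mem_head? hc
    have := (h p (by simp)).2
    simpa using List.all_eq_true.1 this c hcp
  · intro e he
    rw [hd] at he
    obtain rfl : d = e := Option.some.inj he
    have hlast := h ((p :: parts).getLast (by simp)) (List.getLast_mem _)
    simpa using List.all_eq_true.1 hlast.2 _ hdmem

-- ===== VERDICT (by name: the statement is the Claim_ definition above) =====
theorem merged_summary_py_spec : Claim_equal_merged_summary_py := by
  intro summaries _
  unfold Spec_merged_summary_py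
  cases summaries with
  | nil => rfl
  | cons s0 rest =>
    rw [pv_portA_eq, pv_portB_eq, pv_collect_eq]
    simp only
    rw [List.filter_congr (pv_pred_eq s0 rest)]
    have hfilter : (PySem.Str.split₀ s0).filter (pvPredB s0 rest)
        = (PySem.Str.split₀ s0).filter (fun w =>
            decide (pvThr s0 rest ≤ ((pvLow s0 rest).countP
              (fun words => words.contains (PySem.Str.lower w)) : Int))) := rfl
    rw [← hfilter]
    cases hf : (PySem.Str.split₀ s0).filter (pvPredB s0 rest) with
    | nil =>
      simp only [List.take_nil]
      rfl
    | cons t ts =>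
      have hkept : ((t :: ts).take 80) = t :: ts.take 79 := rfl
      rw [hkept]
      have hslice : PySem.List.slice (t :: ts) none (some (80 : Int)) = (t :: ts).take 80 := by
        rw [PySem.List.slice_to (t :: ts) (by norm_num)]; simp
      rw [hslice, hkept]
      -- every kept token is a nonempty whitespace-free split token of s0
      have hmem : ∀ x ∈ t :: ts.take 79, x ∈ PySem.Str.split₀ s0 := by
        intro x hx
        have : x ∈ t :: ts := by
          rcases List.mem_cons.1 hx with rfl | hx'
          · simp
          · exact List.mem_cons_of_mem _ (List.mem_of_mem_take hx')
        rw [← hf] at this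
        exact List.mem_of_mem_filter this
      have hprops : ∀ x ∈ (t :: ts.take 79).map String.toList,
          x ≠ [] ∧ x.all (fun c => !PySem.Chars.isspace c) := by
        intro x hx
        obtain ⟨y, hy, rfl⟩ := List.mem_map.1 hx
        have hys := hmem y hy
        refine ⟨?_, pv_str_split_nonspace s0 y hys⟩
        intro hcon
        exact pv_str_split_ne_empty s0 y hys (pv_str_ext (by simpa using hcon))
      have hjoin := pv_join_strip (t.toList) ((ts.take 79).map String.toList)
        (by simpa using hprops)
      -- move the String-level strip/join through toList
      have htl : (PySem.Str.strip (PySem.Str.join " " (t :: ts.take 79))).toList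
          = (PySem.Str.join " " (t :: ts.take 79)).toList := by
        rw [PySem.Str.toList_strip, PySem.Str.toList_join]
        simpa using hjoin.1
      have hstrip : PySem.Str.strip (PySem.Str.join " " (t :: ts.take 79))
          = PySem.Str.join " " (t :: ts.take 79) := pv_str_ext htl
      have hne : PySem.Str.join " " (t :: ts.take 79) ≠ "" := by
        intro hcon
        have := congrArg String.toList hcon
        rw [PySem.Str.toList_join] at this
        exact hjoin.2 (by simpa using this)
      rw [hstrip, if_neg (by simpa using hne)]
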